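-- pv_equiv track=rewrite | github.com/Shengcao-Cao/LLaVA | llava/serve/seg_utils.py | associate_phrase_token
-- ===== SOURCE A (Python) =====
-- def associate_phrase_token(phrase_start_char, phrase_end_char,
--                            token_start_char, token_end_char,
--                            overlap=True):
--     phrase_token = []
--     for i in range(len(phrase_start_char)):
--         phrase_start = phrase_start_char[i]
--         phrase_end = phrase_end_char[i]
--         phrase_token_i = []
--         for j in range(len(token_start_char)):
--             token_start = token_start_char[j]
--             token_end = token_end_char[j]
--             if overlap:
--                 if token_start < phrase_end and token_end > phrase_start:
--                     phrase_token_i.append(j)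
--             else:
--                 if token_start >= phrase_start and token_end <= phrase_end:
--                     phrase_token_i.append(j)
--         phrase_token.append(phrase_token_i)
--
--     return phrase_token
-- ===== SOURCE B (Python) =====
-- def _bisect_left(a, x):
--     # leftmost insertion point in sorted list a (no bisect import available here)
--     lo, hi = 0, len(a)
--     while lo < hi:
--         mid = (lo + hi) // 2
--         if a[mid] < x:
--             lo = mid + 1
--         else:
--             hi = mid
--     return lo
--
--
-- def associate_phrase_token(phrase_start_char, phrase_end_char,
--                            token_start_char, token_end_char,
--                            overlap=True):
--     # Sort token indices by start offset once; per phrase one binary search on the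
--     # sorted starts prunes the candidates to the half-line selected by the start
--     # condition, the end condition filters them, and the row is re-sorted to index order.
--     n = len(token_start_char)
--     order = sorted(range(n), key=lambda j: token_start_char[j])
--     starts = [token_start_char[j] for j in order]
--     result = []
--     for p_start, p_end in zip(phrase_start_char, phrase_end_char):
--         if overlap:
--             cand = order[:_bisect_left(starts, p_end)]          # token_start < p_end
--             row = [j for j in cand if token_end_char[j] > p_start]
--         else:
--             cand = order[_bisect_left(starts, p_start):]        # token_start >= p_start
--             row = [j for j in cand if token_end_char[j] <= p_end]
--         result.append(sorted(row))
--     return result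
-- ===== Notes on version B (the rewrite author's own statement) =====
-- stated objective: alternative
-- what changed: B pre-sorts the token indices by start offset once and, for each phrase, binary-searches the cutoff on the sorted starts so only the half-line of candidates satisfying the start condition is filtered by the end condition and re-sorted, instead of A's full rescan of all tokens per phrase.
import Mathlib
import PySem

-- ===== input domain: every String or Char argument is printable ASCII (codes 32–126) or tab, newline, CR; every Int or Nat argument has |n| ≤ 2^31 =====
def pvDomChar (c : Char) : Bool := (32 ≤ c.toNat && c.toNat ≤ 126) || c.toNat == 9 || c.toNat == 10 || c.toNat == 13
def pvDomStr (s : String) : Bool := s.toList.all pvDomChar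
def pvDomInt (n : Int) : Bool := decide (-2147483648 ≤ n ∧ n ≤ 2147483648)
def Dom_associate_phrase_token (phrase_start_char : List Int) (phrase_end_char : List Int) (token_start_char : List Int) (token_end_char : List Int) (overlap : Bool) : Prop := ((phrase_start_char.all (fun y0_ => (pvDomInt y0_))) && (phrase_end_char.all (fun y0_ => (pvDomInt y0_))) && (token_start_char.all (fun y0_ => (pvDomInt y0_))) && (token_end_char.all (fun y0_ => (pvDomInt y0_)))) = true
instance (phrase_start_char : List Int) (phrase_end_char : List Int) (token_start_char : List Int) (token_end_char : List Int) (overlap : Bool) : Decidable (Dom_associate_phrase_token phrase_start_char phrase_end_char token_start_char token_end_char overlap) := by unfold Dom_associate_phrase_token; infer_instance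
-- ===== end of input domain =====

-- B sorts the token indices by start offset once and per phrase binary-searches the cutoff
-- on the sorted starts, so only the half-line of candidates selected by the start condition
-- is filtered by the end condition and re-sorted to index order (alternative algorithm:
-- sorted index + binary-search pruning instead of A's full token rescan per phrase).

-- ===== PORT A =====
def associate_phrase_token (phrase_start_char : List Int) (phrase_end_char : List Int) (token_start_char : List Int) (token_end_char : List Int) (overlap : Bool) : List (List Int) :=
  (PySem.List.pyRange 0 (phrase_start_char.length : Int) 1).foldl
    (fun phrase_token i =>
      let phrase_start := PySem.List.pyGetD phrase_start_char i 0
      let phrase_end := PySem.List.pyGetD phrase_end_char i 0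
      let phrase_token_i :=
        (PySem.List.pyRange 0 (token_start_char.length : Int) 1).foldl
          (fun acc j =>
            let token_start := PySem.List.pyGetD token_start_char j 0
            let token_end := PySem.List.pyGetD token_end_char j 0
            if overlap then
              (if token_start < phrase_end ∧ token_end > phrase_start then acc ++ [j] else acc)
            else
              (if token_start ≥ phrase_start ∧ token_end ≤ phrase_end then acc ++ [j] else acc))
          []
      phrase_token ++ [phrase_token_i])
    []

-- ===== PORT B =====
-- Source B's hand-written _bisect_left is the textbook bisect_left loop, which is exactly
-- PySem.List.bisectLeft (PYSEM.md: bisect_left IS bisectLeft), so it is ported as such.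
def associate_phrase_token_alt (phrase_start_char : List Int) (phrase_end_char : List Int) (token_start_char : List Int) (token_end_char : List Int) (overlap : Bool) : List (List Int) :=
  let n := token_start_char.length
  let order := PySem.List.sorted (PySem.List.pyRange 0 (n : Int) 1) (fun j => PySem.List.pyGetD token_start_char j 0) false
  let starts := order.map (fun j => PySem.List.pyGetD token_start_char j 0)
  (phrase_start_char.zip phrase_end_char).foldl
    (fun result p =>
      if overlap then
        let cand := PySem.List.slice order none (some ((PySem.List.bisectLeft starts p.2 : Nat) : Int))
        let row := cand.filter (fun j => decide (PySem.List.pyGetD token_end_char j 0 > p.1))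
        result ++ [PySem.List.sorted row (fun j => j) false]
      else
        let cand := PySem.List.slice order (some ((PySem.List.bisectLeft starts p.1 : Nat) : Int)) none
        let row := cand.filter (fun j => decide (PySem.List.pyGetD token_end_char j 0 ≤ p.2))
        result ++ [PySem.List.sorted row (fun j => j) false])
    []

-- ===== PRECONDITION & SPEC =====
-- Pre_ excludes exactly the inputs on which A raises IndexError: phrase_end_char shorter
-- than phrase_start_char, or (with at least one phrase) token_end_char shorter than
-- token_start_char.
def Pre_associate_phrase_token (phrase_start_char : List Int) (phrase_end_char : List Int) (token_start_char : List Int) (token_end_char : List Int) (overlap : Bool) : Prop :=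
  phrase_start_char.length ≤ phrase_end_char.length ∧
    (phrase_start_char = [] ∨ token_start_char.length ≤ token_end_char.length)
instance (phrase_start_char : List Int) (phrase_end_char : List Int) (token_start_char : List Int) (token_end_char : List Int) (overlap : Bool) : Decidable (Pre_associate_phrase_token phrase_start_char phrase_end_char token_start_char token_end_char overlap) := by unfold Pre_associate_phrase_token; infer_instance

def pvWitness_associate_phrase_token : List Int × List Int × List Int × List Int × Bool :=
  ([0], [5], [1, 4], [3, 6], true)

def Spec_associate_phrase_token (phrase_start_char : List Int) (phrase_end_char : List Int) (token_start_char : List Int) (token_end_char : List Int) (overlap : Bool) (out : List (List Int)) : Prop := out = associate_phrase_token_alt phrase_start_char phrase_end_char token_start_char token_end_char overlap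
instance (phrase_start_char : List Int) (phrase_end_char : List Int) (token_start_char : List Int) (token_end_char : List Int) (overlap : Bool) (out : List (List Int)) : Decidable (Spec_associate_phrase_token phrase_start_char phrase_end_char token_start_char token_end_char overlap out) := by unfold Spec_associate_phrase_token; infer_instance

-- ===== CLAIM (what is proved, stated in full; the proofs are below) =====
def Claim_equal_associate_phrase_token : Prop := ∀ (phrase_start_char : List Int) (phrase_end_char : List Int) (token_start_char : List Int) (token_end_char : List Int) (overlap : Bool), Dom_associate_phrase_token phrase_start_char phrase_end_char token_start_char token_end_char overlap → Pre_associate_phrase_token phrase_start_char phrase_end_char token_start_char token_end_char overlap → Spec_associate_phrase_token phrase_start_char phrase_end_char token_start_char token_end_char overlap (associate_phrase_token phrase_start_char phrase_end_char token_start_char token_end_char overlap)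

-- ===== LEMMAS AND PROOFS =====

-- filtering the kept PREFIX by the end test = filtering the whole list by both tests,
-- when the start test sC holds exactly on the prefix
theorem pv_filter_take (sC eC : Int → Bool) :
    ∀ (order : List Int) (cut : Nat),
      (∀ i (h : i < order.length), i < cut → sC order[i] = true) →
      (∀ i (h : i < order.length), cut ≤ i → sC order[i] = false) →
      (order.take cut).filter eC = order.filter (fun j => sC j && eC j) := by
  intro order
  induction order with
  | nil => intro cut _ _; simp
  | cons x tl ih =>
    intro cut h1 h2
    cases cut with
    | zero =>
      have hx : sC x = false := h2 0 (by simp) (by omega)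
      simpa [hx] using ih 0 (fun i h hi => by omega)
        (fun i h _ => h2 (i+1) (by simpa using Nat.succ_lt_succ h) (by omega))
    | succ c =>
      have hx : sC x = true := h1 0 (by simp) (by omega)
      have ihr := ih c
        (fun i h hi => h1 (i+1) (by simpa using Nat.succ_lt_succ h) (by omega))
        (fun i h hi => h2 (i+1) (by simpa using Nat.succ_lt_succ h) (by omega))
      by_cases he : eC x = true <;> simp [List.filter, hx, he, ihr]

-- dual: the kept SUFFIX, when sC holds exactly from cut on
theorem pv_filter_drop (sC eC : Int → Bool) :
    ∀ (order : List Int) (cut : Nat),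
      (∀ i (h : i < order.length), i < cut → sC order[i] = false) →
      (∀ i (h : i < order.length), cut ≤ i → sC order[i] = true) →
      (order.drop cut).filter eC = order.filter (fun j => sC j && eC j) := by
  intro order
  induction order with
  | nil => intro cut _ _; simp
  | cons x tl ih =>
    intro cut h1 h2
    cases cut with
    | zero =>
      have hx : sC x = true := h2 0 (by simp) (by omega)
      have ihr := ih 0 (fun i h hi => by omega)
        (fun i h _ => h2 (i+1) (by simpa using Nat.succ_lt_succ h) (by omega))
      rw [List.drop_zero] at ihr
      by_cases he : eC x = true <;> simp [List.filter, hx, he, ihr]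
    | succ c =>
      have hx : sC x = false := h1 0 (by simp) (by omega)
      have ihr := ih c
        (fun i h hi => h1 (i+1) (by simpa using Nat.succ_lt_succ h) (by omega))
        (fun i h hi => h2 (i+1) (by simpa using Nat.succ_lt_succ h) (by omega))
      simp [List.filter, hx, ihr]

-- re-sorting a filtered rearrangement of a range gives the range's own filter
theorem pv_sorted_filter_perm (f : Int → Bool) (T : Int) (order : List Int)
    (hperm : order.Perm (PySem.List.pyRange 0 T 1)) :
    PySem.List.sorted (order.filter f) (fun j => j) false
      = (PySem.List.pyRange 0 T 1).filter f := by
  apply PySem.List.sorted_eq_of_perm_of_pairwise_lt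
  · exact (hperm.filter f).symm
  · exact (PySem.List.pairwise_lt_pyRange_one 0 T).filter f

-- B's overlap-mode row for one phrase (a,b) = A's scan of all tokens
theorem pv_row_overlap (ts te : List Int) (a b : Int) :
    (PySem.List.sorted
        (((PySem.List.sorted (PySem.List.pyRange 0 (ts.length : Int) 1)
              (fun j => PySem.List.pyGetD ts j 0) false).take
            (PySem.List.bisectLeft
              ((PySem.List.sorted (PySem.List.pyRange 0 (ts.length : Int) 1)
                  (fun j => PySem.List.pyGetD ts j 0) false).map
                (fun j => PySem.List.pyGetD ts j 0)) b)).filter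
          (fun j => decide (PySem.List.pyGetD te j 0 > a)))
        (fun j => j) false)
      = (PySem.List.pyRange 0 (ts.length : Int) 1).filter
          (fun j => decide (PySem.List.pyGetD ts j 0 < b) && decide (PySem.List.pyGetD te j 0 > a)) := by
  set key := fun j => PySem.List.pyGetD ts j 0 with hkey
  set order := PySem.List.sorted (PySem.List.pyRange 0 (ts.length : Int) 1) key false with horder
  set starts := order.map key with hstarts
  set cut := PySem.List.bisectLeft starts b with hcut
  have hpw : starts.Pairwise (· ≤ ·) := by
    rw [hstarts, horder]; exact PySem.List.sorted_map_key_pairwise _ _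
  obtain ⟨hle, hlt, hge⟩ := PySem.List.bisectLeft_spec starts b hpw
  have hlen : starts.length = order.length := by simp [hstarts]
  have htake : (order.take cut).filter (fun j => decide (PySem.List.pyGetD te j 0 > a))
      = order.filter (fun j => decide (key j < b) && decide (PySem.List.pyGetD te j 0 > a)) := by
    apply pv_filter_take
    · intro i h hi
      have := hlt i (by omega) hi
      simp only [hstarts, List.getElem_map] at this
      simpa using this
    · intro i h hi
      have := hge i (by omega) hi
      simp only [hstarts, List.getElem_map] at this
      simpa using this
  rw [htake]
  exact pv_sorted_filter_perm _ _ _ (PySem.List.sorted_perm _ _ _)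

-- B's containment-mode row for one phrase (a,b) = A's scan of all tokens
theorem pv_row_contain (ts te : List Int) (a b : Int) :
    (PySem.List.sorted
        (((PySem.List.sorted (PySem.List.pyRange 0 (ts.length : Int) 1)
              (fun j => PySem.List.pyGetD ts j 0) false).drop
            (PySem.List.bisectLeft
              ((PySem.List.sorted (PySem.List.pyRange 0 (ts.length : Int) 1)
                  (fun j => PySem.List.pyGetD ts j 0) false).map
                (fun j => PySem.List.pyGetD ts j 0)) a)).filter
          (fun j => decide (PySem.List.pyGetD te j 0 ≤ b)))
        (fun j => j) false)
      = (PySem.List.pyRange 0 (ts.length : Int) 1).filter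
          (fun j => decide (a ≤ PySem.List.pyGetD ts j 0) && decide (PySem.List.pyGetD te j 0 ≤ b)) := by
  set key := fun j => PySem.List.pyGetD ts j 0 with hkey
  set order := PySem.List.sorted (PySem.List.pyRange 0 (ts.length : Int) 1) key false with horder
  set starts := order.map key with hstarts
  set cut := PySem.List.bisectLeft starts a with hcut
  have hpw : starts.Pairwise (· ≤ ·) := by
    rw [hstarts, horder]; exact PySem.List.sorted_map_key_pairwise _ _
  obtain ⟨hle, hlt, hge⟩ := PySem.List.bisectLeft_spec starts a hpw
  have hlen : starts.length = order.length := by simp [hstarts]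
  have hdrop : (order.drop cut).filter (fun j => decide (PySem.List.pyGetD te j 0 ≤ b))
      = order.filter (fun j => decide (a ≤ key j) && decide (PySem.List.pyGetD te j 0 ≤ b)) := by
    apply pv_filter_drop
    · intro i h hi
      have := hlt i (by omega) hi
      simp only [hstarts, List.getElem_map] at this
      simpa using this
    · intro i h hi
      have := hge i (by omega) hi
      simp only [hstarts, List.getElem_map] at this
      simpa using this
  rw [hdrop]
  exact pv_sorted_filter_perm _ _ _ (PySem.List.sorted_perm _ _ _)

-- ===== VERDICT (by name: the statement is the Claim_ definition above) =====
theorem associate_phrase_token_spec : Claim_equal_associate_phrase_token := by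
  intro ps pe ts te ov _hdom hpre
  obtain ⟨h1, _h2⟩ := hpre
  unfold Spec_associate_phrase_token associate_phrase_token associate_phrase_token_alt
  cases ov
  · -- containment mode
    simp only [Bool.false_eq_true, if_false, PySem.List.foldl_append_ite_eq_filter,
      PySem.List.foldl_append_singleton_eq_map, List.nil_append,
      PySem.List.slice_from_natCast]
    apply List.ext_getElem
    · simp [PySem.List.length_pyRange_one]; omega
    · intro k hk1 hk2
      simp only [List.getElem_map, PySem.List.getElem_pyRange_one, List.getElem_zip]
      have hkp : k < ps.length := by
        simpa [PySem.List.length_pyRange_one] using hk1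
      rw [show ((0:Int) + (k:Nat)) = ((k:Nat):Int) by ring]
      rw [PySem.List.pyGetD_natCast ps k 0, PySem.List.pyGetD_natCast pe k 0]
      rw [List.getD_eq_getElem ps 0 hkp, List.getD_eq_getElem pe 0 (by omega)]
      simp only [Bool.decide_and, ge_iff_le]
      exact (pv_row_contain ts te (ps[k]) (pe[k])).symm
  · -- overlap mode
    simp only [if_true, PySem.List.foldl_append_ite_eq_filter,
      PySem.List.foldl_append_singleton_eq_map, List.nil_append,
      PySem.List.slice_to_natCast]
    apply List.ext_getElem
    · simp [PySem.List.length_pyRange_one]; omega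
    · intro k hk1 hk2
      simp only [List.getElem_map, PySem.List.getElem_pyRange_one, List.getElem_zip]
      have hkp : k < ps.length := by
        simpa [PySem.List.length_pyRange_one] using hk1
      rw [show ((0:Int) + (k:Nat)) = ((k:Nat):Int) by ring]
      rw [PySem.List.pyGetD_natCast ps k 0, PySem.List.pyGetD_natCast pe k 0]
      rw [List.getD_eq_getElem ps 0 hkp, List.getD_eq_getElem pe 0 (by omega)]
      simp only [Bool.decide_and]
      exact (pv_row_overlap ts te (ps[k]) (pe[k])).symm
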